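-- pv_equiv track=rewrite | github.com/qingchen3/D-tree | evaluate_BFSDFS.py | DFS_adj
-- ===== SOURCE A (Python) =====
-- def DFS_adj(graph, u, v, visited):
--     if u == v:
--         return True
--
--     visited.add(u)
--
--     for i in graph[u]:
--         if i not in visited:
--             if i == v:
--                 return True
--
--             if DFS_adj(graph, i, v, visited):
--                 return True
--
--     return False
-- ===== SOURCE B (Python) =====
-- def DFS_adj(graph, u, v, visited):
--     # Iterative DFS with an explicit stack of neighbor iterators (same pre-order
--     # traversal, same visited mutations, same KeyError points as A).
--     if u == v:
--         return True
--     visited.add(u)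
--     stack = [iter(graph[u])]
--     while stack:
--         i = next(stack[-1], None)
--         if i is None:
--             stack.pop()
--             continue
--         if i not in visited:
--             if i == v:
--                 return True
--             visited.add(i)
--             stack.append(iter(graph[i]))
--     return False
-- ===== Notes on version B (the rewrite author's own statement) =====
-- stated objective: alternative
-- what changed: Replaces A's recursion by an explicit stack of neighbor iterators (no call recursion, no Python recursion-depth limit), preserving A's exact traversal order, visited mutations and KeyError points.
-- outside the precondition, e.g. on DFS_adj({0: [1], 5: [7]}, 0, 1, set()): A returns True, B returns True; on DFS_adj({0: [9, 1]}, 0, 1, set()): A raises KeyError, B raises KeyError; on DFS_adj({0: [2]}, 0, 1, set()): A raises KeyError, B raises KeyError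
import Mathlib
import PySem

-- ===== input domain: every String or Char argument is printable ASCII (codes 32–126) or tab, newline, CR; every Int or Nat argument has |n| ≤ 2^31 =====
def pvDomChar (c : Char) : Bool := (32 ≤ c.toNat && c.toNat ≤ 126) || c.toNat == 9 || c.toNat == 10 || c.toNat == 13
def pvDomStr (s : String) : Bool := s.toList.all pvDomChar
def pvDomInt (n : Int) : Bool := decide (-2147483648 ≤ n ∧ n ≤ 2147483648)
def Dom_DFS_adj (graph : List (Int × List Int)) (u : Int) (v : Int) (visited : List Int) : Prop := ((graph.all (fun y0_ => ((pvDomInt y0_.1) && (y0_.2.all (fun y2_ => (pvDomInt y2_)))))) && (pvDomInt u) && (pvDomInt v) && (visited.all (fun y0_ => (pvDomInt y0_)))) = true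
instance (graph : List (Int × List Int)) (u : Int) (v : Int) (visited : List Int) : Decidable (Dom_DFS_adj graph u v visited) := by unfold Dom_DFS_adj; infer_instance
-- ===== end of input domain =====

-- B replaces A's recursion by an explicit stack of neighbor iterators (same pre-order
-- traversal, same visited-set mutations in Python, same KeyError points); equivalence
-- here is about the RETURN value (Source B performs the identical mutation of `visited`).

-- dict lookup graph[u]: first match in the association list (none = KeyError)
def pvLookup (graph : List (Int × List Int)) (k : Int) : Option (List Int) :=
  (graph.find? (fun p => p.1 == k)).map (fun p => p.2)

-- ===== PORT A =====
-- A is recursive; the port threads a fuel (consumed once per recursive DFS_adj call,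
-- returned alongside the result) purely as termination plumbing; `min n2 n'` is the
-- identity (fuelA_mono below) and exists only for the termination checker.
mutual
def dfsA (graph : List (Int × List Int)) (v : Int) : Nat → Int → PySem.Set Int → Option (Bool × PySem.Set Int × Nat)
  | n, u, vis =>
    if u = v then some (true, vis, n)
    else
      match pvLookup graph u with
      | none => none                      -- KeyError (outside Pre_)
      | some nbrs => loopA graph v n nbrs (PySem.Set.add vis u)
  termination_by n _ _ => (n, 1, 0)

def loopA (graph : List (Int × List Int)) (v : Int) : Nat → List Int → PySem.Set Int → Option (Bool × PySem.Set Int × Nat)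
  | n, [], w => some (false, w, n)
  | n, i :: rest, w =>
    if PySem.Set.contains w i then loopA graph v n rest w
    else if i = v then some (true, w, n)
    else
      match n with
      | 0 => none                         -- out of fuel (never happens under Pre_)
      | n' + 1 =>
        match dfsA graph v n' i w with
        | none => none
        | some (true, w', n2) => some (true, w', n2)
        | some (false, w', n2) => loopA graph v (min n2 n') rest w'
  termination_by n l _ => (n, 0, l.length)
end

def DFS_adj (graph : List (Int × List Int)) (u : Int) (v : Int) (visited : List Int) : Bool :=
  match dfsA graph v (graph.length + 1) u (PySem.Set.ofList visited) with
  | some (b, _, _) => b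
  | none => false                         -- KeyError / fuel exhaustion: outside Pre_

-- ===== PORT B =====
-- Source B: explicit stack of iterators; `cur` is the iterator on top of the stack
-- (the remaining suffix of a neighbor list), `stk` the rest of the stack.
-- Fuel is consumed once per push (= per new visited node); out of fuel ⇒ none.
def machB (graph : List (Int × List Int)) (v : Int) : Nat → List Int → List (List Int) → PySem.Set Int → Option Bool
  | _, [], [], _ => some false            -- stack exhausted: return False
  | n, [], r :: s, w => machB graph v n r s w    -- iterator exhausted: stack.pop()
  | n, i :: cur, stk, w =>
    if PySem.Set.contains w i then machB graph v n cur stk w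
    else if i = v then some true
    else
      match n with
      | 0 => none
      | n' + 1 =>
        match pvLookup graph i with
        | none => none                    -- KeyError (outside Pre_)
        | some nbrs => machB graph v n' nbrs (cur :: stk) (PySem.Set.add w i)
  termination_by n cur stk _ => (n, cur.length + (stk.map List.length).sum + stk.length)

def DFS_adj_alt (graph : List (Int × List Int)) (u : Int) (v : Int) (visited : List Int) : Bool :=
  if u = v then true
  else
    match pvLookup graph u with
    | none => false                       -- KeyError (outside Pre_)
    | some nbrs =>
      (machB graph v (graph.length + 1) nbrs [] (PySem.Set.add (PySem.Set.ofList visited) u)).getD false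

-- ===== PRECONDITION & SPEC =====
-- The neighbors of a list that A can ever look up: all of them if v is initially
-- visited; otherwise only those strictly before the first occurrence of v (v is never
-- added to visited, so a fresh v neighbor returns True and aborts the whole traversal).
def pvRelevant (v : Int) (visited : List Int) (l : List Int) : List Int :=
  if v ∈ visited then l else l.takeWhile (fun i => i != v)

-- Pre_ excludes the inputs where the Python raises KeyError: u must be a key (unless
-- u == v, returned before any lookup), and every neighbor that could ever be looked up
-- (pvRelevant, minus those in the initial visited set, which are always pruned) must be
-- a key.  A's exact no-KeyError set is not closed-form (whether an ill-formed graph's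
-- dangling entry is reached depends on the traversal), so Pre_ also excludes some
-- ill-formed graphs whose dangling neighbor sits in a part of the graph this run never
-- reaches, on which A happens to return; B behaves identically to A on all of them
-- (see claim.json "cites").
def Pre_DFS_adj (graph : List (Int × List Int)) (u : Int) (v : Int) (visited : List Int) : Prop :=
  u = v ∨ ((pvLookup graph u).isSome = true ∧
    ∀ p ∈ graph, ∀ i ∈ pvRelevant v visited p.2, i ∈ visited ∨ (pvLookup graph i).isSome = true)
instance (graph : List (Int × List Int)) (u : Int) (v : Int) (visited : List Int) : Decidable (Pre_DFS_adj graph u v visited) := by unfold Pre_DFS_adj; infer_instance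

def pvWitness_DFS_adj : (List (Int × List Int)) × Int × Int × List Int :=
  ([(0, [1, 2]), (1, [0]), (2, [1])], 0, 2, [])

def Spec_DFS_adj (graph : List (Int × List Int)) (u : Int) (v : Int) (visited : List Int) (out : Bool) : Prop := out = DFS_adj_alt graph u v visited
instance (graph : List (Int × List Int)) (u : Int) (v : Int) (visited : List Int) (out : Bool) : Decidable (Spec_DFS_adj graph u v visited out) := by unfold Spec_DFS_adj; infer_instance

-- ===== CLAIM (what is proved, stated in full; the proofs are below) =====
def Claim_equal_DFS_adj : Prop := ∀ (graph : List (Int × List Int)) (u : Int) (v : Int) (visited : List Int), Dom_DFS_adj graph u v visited → Pre_DFS_adj graph u v visited → Spec_DFS_adj graph u v visited (DFS_adj graph u v visited)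

-- ===== LEMMAS AND PROOFS =====

-- continuation of the machine when the top iterator finished with result False
def contB (graph : List (Int × List Int)) (v : Int) (n : Nat) (stk : List (List Int)) (w : PySem.Set Int) : Option Bool :=
  match stk with
  | [] => some false
  | r :: s => machB graph v n r s w

-- number of graph keys not yet visited (the fuel measure)
def remA (graph : List (Int × List Int)) (w : PySem.Set Int) : Nat :=
  ((graph.map Prod.fst).filter (fun k => !(PySem.Set.contains w k))).length

-- unfolding equations (the WF-recursive definitions only expose eq_def)
theorem dfsA_unfold (graph : List (Int × List Int)) (v : Int) (n : Nat) (u : Int) (vis : PySem.Set Int) :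
    dfsA graph v n u vis =
      if u = v then some (true, vis, n)
      else
        match pvLookup graph u with
        | none => none
        | some nbrs => loopA graph v n nbrs (PySem.Set.add vis u) := by
  rw [dfsA.eq_def]

theorem loopA_nil (graph : List (Int × List Int)) (v : Int) (n : Nat) (w : PySem.Set Int) :
    loopA graph v n [] w = some (false, w, n) := by
  rw [loopA.eq_def]

theorem loopA_cons (graph : List (Int × List Int)) (v : Int) (n : Nat) (i : Int) (rest : List Int) (w : PySem.Set Int) :
    loopA graph v n (i :: rest) w =
      if PySem.Set.contains w i then loopA graph v n rest w
      else if i = v then some (true, w, n)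
      else
        match n with
        | 0 => none
        | n' + 1 =>
          match dfsA graph v n' i w with
          | none => none
          | some (true, w', n2) => some (true, w', n2)
          | some (false, w', n2) => loopA graph v (min n2 n') rest w' := by
  rw [loopA.eq_def]

theorem machB_nil_nil (graph : List (Int × List Int)) (v : Int) (n : Nat) (w : PySem.Set Int) :
    machB graph v n [] [] w = some false := by
  rw [machB.eq_def]

theorem machB_nil_cons (graph : List (Int × List Int)) (v : Int) (n : Nat) (r : List Int) (s : List (List Int)) (w : PySem.Set Int) :
    machB graph v n [] (r :: s) w = machB graph v n r s w := by
  rw [machB.eq_def]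

theorem machB_cons (graph : List (Int × List Int)) (v : Int) (n : Nat) (i : Int) (cur : List Int) (stk : List (List Int)) (w : PySem.Set Int) :
    machB graph v n (i :: cur) stk w =
      if PySem.Set.contains w i then machB graph v n cur stk w
      else if i = v then some true
      else
        match n with
        | 0 => none
        | n' + 1 =>
          match pvLookup graph i with
          | none => none
          | some nbrs => machB graph v n' nbrs (cur :: stk) (PySem.Set.add w i) := by
  rw [machB.eq_def]

theorem pvLookup_mem {graph : List (Int × List Int)} {k : Int} {nbrs : List Int}
    (h : pvLookup graph k = some nbrs) : (k, nbrs) ∈ graph ∧ k ∈ graph.map Prod.fst := by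
  unfold pvLookup at h
  rcases Option.map_eq_some_iff.mp h with ⟨p, hp, hval⟩
  have hmem := List.mem_of_find?_eq_some hp
  have hpred := List.find?_some hp
  have hk : p.1 = k := by simpa using hpred
  constructor
  · have : p = (k, nbrs) := by cases p; simp_all
    rwa [this] at hmem
  · exact List.mem_map.mpr ⟨p, hmem, hk⟩

theorem contains_add_iff {w : PySem.Set Int} {x y : Int} :
    PySem.Set.contains (PySem.Set.add w x) y = true ↔ (PySem.Set.contains w y = true ∨ y = x) := by
  simp [PySem.Set.contains_iff, PySem.Set.mem_add]

theorem contains_add_of {w : PySem.Set Int} {y : Int} (x : Int)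
    (h : PySem.Set.contains w y = true) : PySem.Set.contains (PySem.Set.add w x) y = true :=
  contains_add_iff.mpr (Or.inl h)

theorem contains_add_self (w : PySem.Set Int) (x : Int) :
    PySem.Set.contains (PySem.Set.add w x) x = true :=
  contains_add_iff.mpr (Or.inr rfl)

theorem countP_not_add_le (w : PySem.Set Int) (x : Int) (l : List Int) :
    l.countP (fun k => !(PySem.Set.contains (PySem.Set.add w x) k)) ≤
      l.countP (fun k => !(PySem.Set.contains w k)) := by
  apply List.countP_mono_left
  intro a _ h
  simp only [Bool.not_eq_true'] at h ⊢
  cases hc : PySem.Set.contains w a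
  · rfl
  · rw [contains_add_of x hc] at h; exact absurd h (by decide)

theorem remA_add_lt {graph : List (Int × List Int)} {w : PySem.Set Int} {x : Int}
    (hx : x ∈ graph.map Prod.fst) (hw : PySem.Set.contains w x = false) :
    remA graph (PySem.Set.add w x) < remA graph w := by
  unfold remA
  rw [← List.countP_eq_length_filter, ← List.countP_eq_length_filter]
  rcases List.append_of_mem hx with ⟨l₁, l₂, hs⟩
  rw [hs, List.countP_append, List.countP_append, List.countP_cons, List.countP_cons]
  have h1 := countP_not_add_le w x l₁
  have h2 := countP_not_add_le w x l₂
  have e1 : (!(PySem.Set.contains (PySem.Set.add w x) x)) = false := by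
    simp [contains_add_self]
  have e2 : (!(PySem.Set.contains w x)) = true := by rw [hw]; rfl
  simp only [e1, e2, Bool.false_eq_true, if_false, if_true, if_pos, if_neg]
  omega

-- fuel monotonicity & visited growth for the A-side recursion
theorem fuelA_mono (graph : List (Int × List Int)) (v : Int) :
    ∀ n, (∀ rest w b w2 n2, loopA graph v n rest w = some (b, w2, n2) →
            n2 ≤ n ∧ ∀ x, PySem.Set.contains w x = true → PySem.Set.contains w2 x = true) ∧
         (∀ u vis b w2 n2, dfsA graph v n u vis = some (b, w2, n2) →
            n2 ≤ n ∧ ∀ x, PySem.Set.contains vis x = true → PySem.Set.contains w2 x = true) := by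
  intro n
  induction n using Nat.strong_induction_on with
  | _ n IHn =>
    have hloop : ∀ rest w b w2 n2, loopA graph v n rest w = some (b, w2, n2) →
        n2 ≤ n ∧ ∀ x, PySem.Set.contains w x = true → PySem.Set.contains w2 x = true := by
      intro rest
      induction rest with
      | nil =>
        intro w b w2 n2 h
        rw [loopA_nil] at h
        obtain ⟨hb, hw, hn⟩ : false = b ∧ w = w2 ∧ n = n2 := by simpa using h
        subst hb; subst hw; subst hn
        exact ⟨le_rfl, fun x hx => hx⟩
      | cons i rest IH =>
        intro w b w2 n2 h
        rw [loopA_cons] at h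
        by_cases hc : PySem.Set.contains w i = true
        · rw [if_pos hc] at h; exact IH w b w2 n2 h
        · rw [if_neg hc] at h
          by_cases hv : i = v
          · rw [if_pos hv] at h
            obtain ⟨hb, hw, hn⟩ : true = b ∧ w = w2 ∧ n = n2 := by simpa using h
            subst hb; subst hw; subst hn
            exact ⟨le_rfl, fun x hx => hx⟩
          · rw [if_neg hv] at h
            cases n with
            | zero => exact absurd h (by simp)
            | succ n' =>
              cases hd : dfsA graph v n' i w with
              | none => simp only [hd] at h; exact absurd h (by simp)
              | some r =>
                obtain ⟨b', w', n2'⟩ := r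
                simp only [hd] at h
                have hdm := ((IHn n' (by omega)).2) i w b' w' n2' hd
                cases b' with
                | true =>
                  obtain ⟨hb, hw, hn⟩ : true = b ∧ w' = w2 ∧ n2' = n2 := by simpa using h
                  subst hb; subst hw; subst hn
                  exact ⟨by omega, fun x hx => hdm.2 x hx⟩
                | false =>
                  have hlm := ((IHn (min n2' n') (by omega)).1) rest w' b w2 n2 h
                  exact ⟨by omega, fun x hx => hlm.2 x (hdm.2 x hx)⟩
    refine ⟨hloop, ?_⟩
    intro u vis b w2 n2 h
    rw [dfsA_unfold] at h
    by_cases huv : u = v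
    · rw [if_pos huv] at h
      obtain ⟨hb, hw, hn⟩ : true = b ∧ vis = w2 ∧ n = n2 := by simpa using h
      subst hb; subst hw; subst hn
      exact ⟨le_rfl, fun x hx => hx⟩
    · rw [if_neg huv] at h
      cases hl : pvLookup graph u with
      | none => simp only [hl] at h; exact absurd h (by simp)
      | some nbrs =>
        simp only [hl] at h
        have := hloop nbrs (PySem.Set.add vis u) b w2 n2 h
        exact ⟨this.1, fun x hx => this.2 x (contains_add_of u hx)⟩

theorem relevant_head {i v : Int} {visited rest : List Int} (h : i ≠ v) :
    i ∈ pvRelevant v visited (i :: rest) := by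
  unfold pvRelevant
  split
  · simp
  · simp [List.takeWhile_cons, h]

theorem relevant_tail {i v : Int} {visited rest : List Int} (h : i ≠ v) :
    ∀ j ∈ pvRelevant v visited rest, j ∈ pvRelevant v visited (i :: rest) := by
  intro j hj
  unfold pvRelevant at hj ⊢
  split
  · rename_i hv; rw [if_pos hv] at hj; simp [hj]
  · rename_i hv; rw [if_neg hv] at hj; simp [List.takeWhile_cons, h, hj]

theorem relevant_all {v : Int} {visited l : List Int} (h : v ∈ visited) :
    pvRelevant v visited l = l := by
  unfold pvRelevant; rw [if_pos h]

-- fuel sufficiency under the no-KeyError hypothesis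
theorem fuelA_total (graph : List (Int × List Int)) (v : Int) (visited : List Int)
    (hP : ∀ p ∈ graph, ∀ i ∈ pvRelevant v visited p.2, i ∈ visited ∨ (pvLookup graph i).isSome = true) :
    ∀ n, (∀ rest w, (∀ i ∈ pvRelevant v visited rest, i ∈ visited ∨ (pvLookup graph i).isSome = true) →
            (∀ x ∈ visited, PySem.Set.contains w x = true) →
            (PySem.Set.contains w v = true → v ∈ visited) →
            remA graph w < n →
            ∃ b w2 n2, loopA graph v n rest w = some (b, w2, n2) ∧ remA graph w2 < n2 ∧
              (∀ x ∈ visited, PySem.Set.contains w2 x = true) ∧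
              (PySem.Set.contains w2 v = true → v ∈ visited)) := by
  intro n
  induction n using Nat.strong_induction_on with
  | _ n IHn =>
    intro rest
    induction rest with
    | nil =>
      intro w _ hvw hwv hn
      exact ⟨false, w, n, loopA_nil .., hn, hvw, hwv⟩
    | cons i rest IH =>
      intro w hrest hvw hwv hn
      by_cases hc : PySem.Set.contains w i = true
      · -- skipped neighbor; if i = v then v ∈ visited (hwv), so pvRelevant is the
        -- whole list and the tail hypothesis is immediate either way
        have hrest' : ∀ j ∈ pvRelevant v visited rest, j ∈ visited ∨ (pvLookup graph j).isSome = true := by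
          by_cases hiv : i = v
          · intro j hj
            have hvvis : v ∈ visited := hwv (hiv ▸ hc)
            exact hrest j (by rw [relevant_all hvvis] at hj ⊢; simp [hj])
          · exact fun j hj => hrest j (relevant_tail hiv j hj)
        obtain ⟨b, w2, n2, h, h2, h3, h4⟩ := IH w hrest' hvw hwv hn
        exact ⟨b, w2, n2, by rw [loopA_cons, if_pos hc]; exact h, h2, h3, h4⟩
      · by_cases hv : i = v
        · exact ⟨true, w, n, by rw [loopA_cons, if_neg hc, if_pos hv], hn, hvw, hwv⟩
        · -- fresh neighbor ≠ v: by hrest it is a key (not in initial visited, since not in w)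
          have hkey : (pvLookup graph i).isSome = true := by
            rcases hrest i (relevant_head hv) with h | h
            · exact absurd (hvw i h) (by simp_all)
            · exact h
          cases hl : pvLookup graph i with
          | none => rw [hl] at hkey; simp at hkey
          | some nbrs =>
            cases n with
            | zero => omega
            | succ n' =>
              have hmem := (pvLookup_mem hl).2
              have hlt : remA graph (PySem.Set.add w i) < n' := by
                have := remA_add_lt (w := w) hmem (by simp_all)
                omega
              have hwv' : PySem.Set.contains (PySem.Set.add w i) v = true → v ∈ visited := by
                intro h
                rcases contains_add_iff.mp h with h | h
                · exact hwv h
                · exact absurd h.symm hv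
              obtain ⟨b', w', n2, hd, hrem, hvw', hwv2⟩ :=
                IHn n' (by omega) nbrs (PySem.Set.add w i)
                  (fun j hj => hP (i, nbrs) (pvLookup_mem hl).1 j hj)
                  (fun x hx => contains_add_of i (hvw x hx)) hwv' hlt
              have hdfs : dfsA graph v n' i w = some (b', w', n2) := by
                rw [dfsA_unfold, if_neg hv, hl]; exact hd
              have hn2 : n2 ≤ n' :=
                (((fuelA_mono graph v n').1) nbrs (PySem.Set.add w i) b' w' n2 hd).1
              cases b' with
              | true =>
                exact ⟨true, w', n2, by rw [loopA_cons, if_neg hc, if_neg hv]; simp only [hdfs], hrem, hvw', hwv2⟩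
              | false =>
                obtain ⟨b2, w3, n3, hcont, hrem3, hvw3, hwv3⟩ :=
                  IHn n2 (by omega) rest w' (fun j hj => hrest j (relevant_tail hv j hj)) hvw' hwv2 hrem
                refine ⟨b2, w3, n3, ?_, hrem3, hvw3, hwv3⟩
                rw [loopA_cons, if_neg hc, if_neg hv]
                simp only [hdfs, min_eq_left hn2]
                exact hcont

-- the stack machine simulates the recursion: running with top iterator `cur` equals
-- running the A-side loop on `cur`, then continuing with the rest of the stack
theorem simB (graph : List (Int × List Int)) (v : Int) :
    ∀ n cur stk w, machB graph v n cur stk w =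
      match loopA graph v n cur w with
      | none => none
      | some (true, _, _) => some true
      | some (false, w2, n2) => contB graph v n2 stk w2 := by
  intro n
  induction n using Nat.strong_induction_on with
  | _ n IHn =>
    intro cur
    induction cur with
    | nil =>
      intro stk w
      cases stk with
      | nil => rw [machB_nil_nil, loopA_nil]; rfl
      | cons r s => rw [machB_nil_cons, loopA_nil]; rfl
    | cons i cur IH =>
      intro stk w
      rw [machB_cons, loopA_cons]
      by_cases hc : PySem.Set.contains w i = true
      · rw [if_pos hc, if_pos hc]; exact IH stk w
      · rw [if_neg hc, if_neg hc]
        by_cases hv : i = v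
        · rw [if_pos hv, if_pos hv]
        · rw [if_neg hv, if_neg hv]
          cases n with
          | zero => rfl
          | succ n' =>
            cases hl : pvLookup graph i with
            | none =>
              simp [dfsA_unfold, hl, hv]
            | some nbrs =>
              have hdfs : dfsA graph v n' i w = loopA graph v n' nbrs (PySem.Set.add w i) := by
                rw [dfsA_unfold, if_neg hv, hl]
              simp only [hl]
              rw [hdfs]
              rw [IHn n' (by omega) nbrs (cur :: stk) (PySem.Set.add w i)]
              cases hlp : loopA graph v n' nbrs (PySem.Set.add w i) with
              | none => simp only [hlp]
              | some r =>
                obtain ⟨b', w', n2⟩ := r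
                cases b' with
                | true => simp only [hlp]
                | false =>
                  have hn2 : n2 ≤ n' :=
                    (((fuelA_mono graph v n').1) nbrs (PySem.Set.add w i) false w' n2 hlp).1
                  simp only [hlp, contB, min_eq_left hn2]
                  exact IHn n2 (by omega) cur stk w'

theorem remA_le (graph : List (Int × List Int)) (w : PySem.Set Int) :
    remA graph w ≤ graph.length := by
  unfold remA
  calc ((graph.map Prod.fst).filter _).length ≤ (graph.map Prod.fst).length :=
        List.length_filter_le _ _
    _ = graph.length := List.length_map ..

-- ===== VERDICT (by name: the statement is the Claim_ definition above) =====
theorem DFS_adj_spec : Claim_equal_DFS_adj := by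
  intro graph u v visited _ hpre
  unfold Spec_DFS_adj
  by_cases huv : u = v
  · unfold DFS_adj DFS_adj_alt
    rw [dfsA_unfold]
    simp [huv]
  · rcases hpre with h | ⟨hu, hP⟩
    · exact absurd h huv
    cases hl : pvLookup graph u with
    | none => rw [hl] at hu; simp at hu
    | some nbrs =>
      have hmemP : ∀ i ∈ pvRelevant v visited nbrs, i ∈ visited ∨ (pvLookup graph i).isSome = true :=
        fun i hi => hP (u, nbrs) (pvLookup_mem hl).1 i hi
      have hvw : ∀ x ∈ visited, PySem.Set.contains (PySem.Set.add (PySem.Set.ofList visited) u) x = true := by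
        intro x hx
        exact contains_add_of u (by simp [PySem.Set.mem_ofList, hx])
      have hwv : PySem.Set.contains (PySem.Set.add (PySem.Set.ofList visited) u) v = true → v ∈ visited := by
        intro h
        rcases contains_add_iff.mp h with h | h
        · simpa [PySem.Set.contains_iff, PySem.Set.mem_ofList] using h
        · exact absurd h.symm huv
      have hfuel : remA graph (PySem.Set.add (PySem.Set.ofList visited) u) < graph.length + 1 := by
        have := remA_le graph (PySem.Set.add (PySem.Set.ofList visited) u); omega
      obtain ⟨b, w2, n2, hloop, _, _, _⟩ :=
        fuelA_total graph v visited hP (graph.length + 1) nbrs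
          (PySem.Set.add (PySem.Set.ofList visited) u) hmemP hvw hwv hfuel
      have hA : DFS_adj graph u v visited = b := by
        unfold DFS_adj
        rw [dfsA_unfold, if_neg huv]
        simp only [hl, hloop]
      have hB : DFS_adj_alt graph u v visited = b := by
        unfold DFS_adj_alt
        rw [if_neg huv]
        simp only [hl]
        rw [simB graph v (graph.length + 1) nbrs [] (PySem.Set.add (PySem.Set.ofList visited) u)]
        simp only [hloop]
        cases b <;> rfl
      rw [hA, hB]
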